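-- pv_equiv track=rewrite | github.com/zhangshi0512/Leetcode | Data Structure + Algorithm/01 & 02 Array/LC487_MaxConsecutiveOnesII.py | findMaxConsecutiveOnesII
-- ===== SOURCE A (Python) =====
-- def findMaxConsecutiveOnesII(nums):
--     zero = one = max_len = 0
--     # 遍历数组，如果当前数是1，则 zero 和 one 都加1，
--     # 如果当前数是0，则 one 变为 zero + 1，zero 变为0。
--     for num in nums:
--         if num == 1:
--             zero += 1
--             one += 1
--         else:
--             one = zero + 1
--             zero = 0
--         # 每次遍历后都更新最大值。
--         max_len = max(max_len, one)
--
--     return max_len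
-- ===== SOURCE B (Python) =====
-- def findMaxConsecutiveOnesII(nums):
--     # Sliding window: keep the current window (at most one non-one inside)
--     # and shrink from the left when a second non-one enters.
--     best = 0
--     window = []
--     count = 0  # non-ones currently inside the window
--     for num in nums:
--         window.append(num)
--         if num != 1:
--             count += 1
--         while count > 1:
--             if window.pop(0) != 1:
--                 count -= 1
--         best = max(best, len(window))
--     return best
-- ===== Notes on version B (the rewrite author's own statement) =====
-- stated objective: alternative
-- what changed: Replaced A's two-counter DP recurrence by a sliding-window algorithm that keeps the current at-most-one-non-one window explicitly and shrinks it from the left when a second non-one enters.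
import Mathlib
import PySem

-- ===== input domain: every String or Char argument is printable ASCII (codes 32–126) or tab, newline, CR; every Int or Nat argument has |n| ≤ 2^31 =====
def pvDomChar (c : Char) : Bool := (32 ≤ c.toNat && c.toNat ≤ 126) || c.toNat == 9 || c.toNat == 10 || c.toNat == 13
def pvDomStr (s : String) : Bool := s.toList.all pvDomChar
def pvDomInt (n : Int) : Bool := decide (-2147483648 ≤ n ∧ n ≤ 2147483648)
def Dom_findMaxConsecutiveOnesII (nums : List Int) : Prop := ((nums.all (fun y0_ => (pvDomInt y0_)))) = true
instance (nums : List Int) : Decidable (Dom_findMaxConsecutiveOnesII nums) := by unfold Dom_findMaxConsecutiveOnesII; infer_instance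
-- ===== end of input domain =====

-- B replaces A's two-counter DP recurrence by an explicit sliding window (alternative decomposition, same cost).

-- ===== PORT A =====
-- state: (zero, one, max_len)
def stepA (s : Int × Int × Int) (num : Int) : Int × Int × Int :=
  if num = 1 then (s.1 + 1, s.2.1 + 1, max s.2.2 (s.2.1 + 1))
  else (0, s.1 + 1, max s.2.2 (s.1 + 1))

def findMaxConsecutiveOnesII (nums : List Int) : Int :=
  (nums.foldl stepA (0, 0, 0)).2.2

-- ===== PORT B =====
-- the 'while count > 1: pop from the left' loop (the [] case is a totality guard, unreachable since count ≤ non-ones in window)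
def shrink : List Int → Int → List Int × Int
  | [], c => ([], c)
  | y :: t, c => if 1 < c then shrink t (if y = 1 then c else c - 1) else (y :: t, c)

-- state: (window, count, best)
def stepB (s : List Int × Int × Int) (num : Int) : List Int × Int × Int :=
  let p := shrink (s.1 ++ [num]) (if num = 1 then s.2.1 else s.2.1 + 1)
  (p.1, p.2, max s.2.2 (p.1.length : Int))

def findMaxConsecutiveOnesII_alt (nums : List Int) : Int :=
  (nums.foldl stepB ([], 0, 0)).2.2

-- ===== PRECONDITION & SPEC =====
def Spec_findMaxConsecutiveOnesII (nums : List Int) (out : Int) : Prop := out = findMaxConsecutiveOnesII_alt nums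
instance (nums : List Int) (out : Int) : Decidable (Spec_findMaxConsecutiveOnesII nums out) := by unfold Spec_findMaxConsecutiveOnesII; infer_instance

-- ===== CLAIM (what is proved, stated in full; the proofs are below) =====
def Claim_equal_findMaxConsecutiveOnesII : Prop := ∀ (nums : List Int), Dom_findMaxConsecutiveOnesII nums → Spec_findMaxConsecutiveOnesII nums (findMaxConsecutiveOnesII nums)

-- ===== LEMMAS AND PROOFS =====

-- the coupling invariant between A's counters and B's window
def InvAB (s : Int × Int × Int) (t : List Int × Int × Int) : Prop :=
  s.2.1 = (t.1.length : Int) ∧ s.2.2 = t.2.2 ∧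
  ((t.2.1 = 0 ∧ (∀ y ∈ t.1, y = 1) ∧ s.1 = (t.1.length : Int)) ∨
   (t.2.1 = 1 ∧ ∃ a x r, t.1 = a ++ x :: r ∧ (∀ y ∈ a, y = 1) ∧ x ≠ 1 ∧
      (∀ y ∈ r, y = 1) ∧ s.1 = (r.length : Int)))

theorem shrink_le (w : List Int) (c : Int) (h : c ≤ 1) : shrink w c = (w, c) := by
  cases w with
  | nil => simp [shrink]
  | cons y t => simp [shrink]; omega

theorem shrink_two (a : List Int) (x : Int) (r : List Int)
    (ha : ∀ y ∈ a, y = 1) (hx : x ≠ 1) : shrink (a ++ x :: r) 2 = (r, 1) := by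
  induction a with
  | nil =>
      simp [shrink, hx]
      exact shrink_le r 1 (by omega)
  | cons y t ih =>
      have hy : y = 1 := ha y (by simp)
      simp [shrink, hy]
      exact ih (fun z hz => ha z (by simp [hz]))

theorem step_inv (s : Int × Int × Int) (t : List Int × Int × Int) (num : Int)
    (h : InvAB s t) : InvAB (stepA s num) (stepB t num) := by
  obtain ⟨w, c, b⟩ := t
  obtain ⟨z, o, m⟩ := s
  obtain ⟨h1, h2, h3⟩ := h
  simp only at h1 h2 h3
  by_cases hnum : num = 1
  · -- num = 1 : window just grows
    subst hnum
    have kA : stepA (z, o, m) 1 = (z + 1, o + 1, max m (o + 1)) := by simp [stepA]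
    rcases h3 with ⟨hc, hall, hz⟩ | ⟨hc, a, x, r, hw, hall, hx, hr, hz⟩
    · subst hc
      have hall' : ∀ y ∈ w ++ [1], y = (1 : Int) := by
        intro y hy
        rcases List.mem_append.mp hy with hy | hy
        · exact hall y hy
        · simpa using hy
      have hs := shrink_le (w ++ [1]) 0 (by omega)
      have kB : stepB (w, 0, b) 1 = (w ++ [1], 0, max b ((w ++ [1]).length : Int)) := by
        simp [stepB, hs]
      rw [kA, kB]
      refine ⟨?_, ?_, Or.inl ⟨rfl, hall', ?_⟩⟩ <;> simp [h1, h2, hz]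
    · subst hc
      have hr' : ∀ y ∈ r ++ [1], y = (1 : Int) := by
        intro y hy
        rcases List.mem_append.mp hy with hy | hy
        · exact hr y hy
        · simpa using hy
      have hs := shrink_le (w ++ [1]) 1 (by omega)
      have kB : stepB (w, 1, b) 1 = (w ++ [1], 1, max b ((w ++ [1]).length : Int)) := by
        simp [stepB, hs]
      rw [kA, kB]
      refine ⟨?_, ?_, Or.inr ⟨rfl, a, x, r ++ [1], ?_, hall, hx, hr', ?_⟩⟩ <;>
        simp [h1, h2, hz, hw] <;> omega
  · -- num ≠ 1
    have kA : stepA (z, o, m) num = (0, z + 1, max m (z + 1)) := by simp [stepA, hnum]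
    rcases h3 with ⟨hc, hall, hz⟩ | ⟨hc, a, x, r, hw, hall, hx, hr, hz⟩
    · -- first non-one: count becomes 1, no shrink
      subst hc
      have hs := shrink_le (w ++ [num]) 1 (by omega)
      have kB : stepB (w, 0, b) num = (w ++ [num], 1, max b ((w ++ [num]).length : Int)) := by
        simp [stepB, hnum]
        simp [hs]
      rw [kA, kB]
      refine ⟨?_, ?_, Or.inr ⟨rfl, w, num, [], by simp, hall, hnum, by simp, by simp⟩⟩ <;>
        simp [h2, hz]
    · -- second non-one: shrink past the old one
      subst hc
      have hs : shrink (w ++ [num]) 2 = (r ++ [num], 1) := by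
        rw [hw]
        have he : (a ++ x :: r) ++ [num] = a ++ x :: (r ++ [num]) := by simp
        rw [he]
        exact shrink_two a x (r ++ [num]) hall hx
      have kB : stepB (w, 1, b) num = (r ++ [num], 1, max b ((r ++ [num]).length : Int)) := by
        simp [stepB, hnum]
        simp [hs]
      rw [kA, kB]
      refine ⟨?_, ?_, Or.inr ⟨rfl, r, num, [], by simp, hr, hnum, by simp, by simp⟩⟩ <;>
        simp [h2, hz]

theorem foldl_inv (l : List Int) (s : Int × Int × Int) (t : List Int × Int × Int)
    (h : InvAB s t) : InvAB (l.foldl stepA s) (l.foldl stepB t) := by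
  induction l generalizing s t with
  | nil => exact h
  | cons num l ih => exact ih _ _ (step_inv s t num h)

-- ===== VERDICT (by name: the statement is the Claim_ definition above) =====
theorem findMaxConsecutiveOnesII_spec : Claim_equal_findMaxConsecutiveOnesII := by
  intro nums _
  have h : InvAB (nums.foldl stepA (0, 0, 0)) (nums.foldl stepB ([], 0, 0)) :=
    foldl_inv nums _ _ ⟨by simp, by simp, Or.inl (by simp)⟩
  exact h.2.1
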